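-- pv_equiv track=rewrite | github.com/loeschalex/got-wic | src/got_wic/optimize.py | _feasible_combos
-- ===== SOURCE A (Python) =====
-- from itertools import product
--
-- def _feasible_combos(steps: list[int], n: int) -> list[tuple[int, ...]]:
--     """Generate all n-tuples from steps that sum to <= 100."""
--     if n == 0:
--         return [()]
--     if n == 1:
--         return [(s,) for s in steps]
--     results = []
--     for combo in product(steps, repeat=n):
--         if sum(combo) <= 100:
--             results.append(combo)
--     return results
-- ===== SOURCE B (Python) =====
-- def _feasible_combos(steps: list[int], n: int) -> list[tuple[int, ...]]:
--     """Generate all n-tuples from steps that sum to <= 100, building the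
--     tuples level by level and pruning a partial tuple as soon as even
--     filling its remaining slots with the smallest step cannot stay <= 100."""
--     if n <= 0:
--         return [()]
--     if not steps:
--         return []
--     m = min(steps)
--     partials = [((), 0)]
--     for rem in range(n, 0, -1):
--         bound = 100 - (rem - 1) * m
--         nxt = []
--         for prefix, acc in partials:
--             for s in steps:
--                 if acc + s <= bound:
--                     nxt.append((prefix + (s,), acc + s))
--         partials = nxt
--     return [prefix for prefix, _ in partials]
-- ===== Notes on version B (the rewrite author's own statement) =====
-- stated objective: alternative
-- what changed: Replaces the full itertools.product enumeration with a per-tuple sum by a level-by-level frontier of (prefix, running-sum) pairs that drops a partial tuple as soon as acc + s + (remaining-1)*min(steps) exceeds 100.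
-- intended difference: For n == 1 with some step > 100, A returns every singleton (its n==1 shortcut skips the <=100 filter) while B returns only the singletons summing to <= 100, which is what the docstring specifies. — e.g. on _feasible_combos([101, 5], 1): A returns [[101], [5]], B returns [[5]]
import Mathlib
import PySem

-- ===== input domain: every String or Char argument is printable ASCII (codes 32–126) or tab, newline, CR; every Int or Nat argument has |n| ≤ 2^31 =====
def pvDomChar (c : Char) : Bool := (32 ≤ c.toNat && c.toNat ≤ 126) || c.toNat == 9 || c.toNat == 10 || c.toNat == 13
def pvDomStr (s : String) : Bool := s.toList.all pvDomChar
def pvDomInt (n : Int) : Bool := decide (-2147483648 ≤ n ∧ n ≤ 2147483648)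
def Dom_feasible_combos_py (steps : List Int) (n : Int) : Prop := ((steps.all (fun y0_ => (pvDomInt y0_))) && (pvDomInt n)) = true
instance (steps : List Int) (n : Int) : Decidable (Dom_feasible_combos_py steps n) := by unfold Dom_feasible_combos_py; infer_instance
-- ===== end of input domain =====

-- B replaces the full product enumeration (summing each tuple) by a level-by-level
-- frontier of (prefix, running sum) pairs with a min-step lower-bound prune.

-- ===== PORT A =====
-- itertools.product(steps, repeat=k), lexicographic (first coordinate slowest)
def pvProd (steps : List Int) : Nat → List (List Int)
  | 0 => [[]]
  | k+1 => steps.flatMap (fun s => (pvProd steps k).map (fun c => s :: c))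

def feasible_combos_py (steps : List Int) (n : Int) : List (List Int) :=
  if n = 0 then [[]]
  else if n = 1 then steps.map (fun s => [s])
  else (pvProd steps n.toNat).foldl
    (fun results combo => if combo.sum ≤ 100 then results ++ [combo] else results) []

-- ===== PORT B =====
-- one pass of the "for rem in range(n, 0, -1)" loop per level; the inner two loops
-- ("for prefix, acc in partials: for s in steps: if ...: nxt.append(...)") are the flatMaps
def pvLevels (steps : List Int) (m : Int) : Nat → List (List Int × Int) → List (List Int × Int)
  | 0, partials => partials
  | rem+1, partials =>
      pvLevels steps m rem
        (partials.flatMap (fun pa => steps.flatMap (fun s =>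
          if pa.2 + s ≤ 100 - (rem : Int) * m then [(pa.1 ++ [s], pa.2 + s)] else [])))

def feasible_combos_py_alt (steps : List Int) (n : Int) : List (List Int) :=
  if n ≤ 0 then [[]]
  else match PySem.List.min? steps (fun x => x) with
    | none => []
    | some m => (pvLevels steps m n.toNat [([], 0)]).map (fun pa => pa.1)

-- ===== PRECONDITION & SPEC =====
-- A raises ValueError (product repeat argument cannot be negative) when n < 0.
def Pre_feasible_combos_py (steps : List Int) (n : Int) : Prop := 0 ≤ n
instance (steps : List Int) (n : Int) : Decidable (Pre_feasible_combos_py steps n) := by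
  unfold Pre_feasible_combos_py; infer_instance
def pvWitness_feasible_combos_py : List Int × Int := ([1, 2], 2)

-- For n == 1 with some step > 100, A returns every singleton (its n==1 shortcut skips the
-- <=100 filter) while B returns only the singletons summing to <= 100, as the docstring specifies.
def D_feasible_combos_py (steps : List Int) (n : Int) : Prop := n = 1 ∧ ∃ s ∈ steps, 100 < s
instance (steps : List Int) (n : Int) : Decidable (D_feasible_combos_py steps n) := by
  unfold D_feasible_combos_py; infer_instance

def Spec_feasible_combos_py (steps : List Int) (n : Int) (out : List (List Int)) : Prop :=
  ¬ D_feasible_combos_py steps n → out = feasible_combos_py_alt steps n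
instance (steps : List Int) (n : Int) (out : List (List Int)) : Decidable (Spec_feasible_combos_py steps n out) := by
  unfold Spec_feasible_combos_py; infer_instance

def pvDiffWitness_feasible_combos_py : List Int × Int := ([101, 5], 1)
def pvDiffWitnessOut_feasible_combos_py : (List (List Int)) × (List (List Int)) :=
  ([[101], [5]], [[5]])

-- ===== CLAIM (what is proved, stated in full; the proofs are below) =====
def Claim_unchanged_feasible_combos_py : Prop := ∀ (steps : List Int) (n : Int), Dom_feasible_combos_py steps n → Pre_feasible_combos_py steps n → Spec_feasible_combos_py steps n (feasible_combos_py steps n)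
def Claim_changed_feasible_combos_py : Prop := Dom_feasible_combos_py (pvDiffWitness_feasible_combos_py.1) (pvDiffWitness_feasible_combos_py.2) ∧ Pre_feasible_combos_py (pvDiffWitness_feasible_combos_py.1) (pvDiffWitness_feasible_combos_py.2) ∧ D_feasible_combos_py (pvDiffWitness_feasible_combos_py.1) (pvDiffWitness_feasible_combos_py.2) ∧ feasible_combos_py (pvDiffWitness_feasible_combos_py.1) (pvDiffWitness_feasible_combos_py.2) = pvDiffWitnessOut_feasible_combos_py.1 ∧ feasible_combos_py_alt (pvDiffWitness_feasible_combos_py.1) (pvDiffWitness_feasible_combos_py.2) = pvDiffWitnessOut_feasible_combos_py.2 ∧ pvDiffWitnessOut_feasible_combos_py.1 ≠ pvDiffWitnessOut_feasible_combos_py.2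
def Claim_exact_feasible_combos_py : Prop := ∀ (steps : List Int) (n : Int), Dom_feasible_combos_py steps n → Pre_feasible_combos_py steps n → D_feasible_combos_py steps n → feasible_combos_py steps n ≠ feasible_combos_py_alt steps n

-- ===== LEMMAS AND PROOFS =====

theorem pv_flatMap_congr {α β : Type} {l : List α} {f g : α → List β}
    (h : ∀ a ∈ l, f a = g a) : l.flatMap f = l.flatMap g := by
  induction l with
  | nil => rfl
  | cons x t ih =>
    simp only [List.flatMap_cons]
    rw [h x (by simp), ih (fun a ha => h a (by simp [ha]))]

theorem pvProd_one (steps : List Int) : pvProd steps 1 = steps.map (fun s => [s]) := by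
  induction steps with
  | nil => rfl
  | cons x t ih => simp only [pvProd, List.flatMap_cons, List.map_cons] at *; simpa using ih

-- every tuple in pvProd steps k has sum ≥ k * (a lower bound of steps)
theorem pvProd_sum_lb (steps : List Int) (m : Int) (hm : ∀ s ∈ steps, m ≤ s) :
    ∀ (k : Nat) (c : List Int), c ∈ pvProd steps k → (k : Int) * m ≤ c.sum := by
  intro k
  induction k with
  | zero => intro c hc; simp [pvProd] at hc; simp [hc]
  | succ k ih =>
    intro c hc
    simp only [pvProd, List.mem_flatMap, List.mem_map] at hc
    obtain ⟨s, hs, c', hc', rfl⟩ := hc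
    have h1 := ih c' hc'
    have h2 := hm s hs
    simp only [List.sum_cons]
    push_cast
    nlinarith

-- the level-by-level frontier equals product-then-filter
theorem pvLevels_eq (steps : List Int) (m : Int) (hm : ∀ s ∈ steps, m ≤ s) :
    ∀ (k : Nat) (partials : List (List Int × Int)),
      (∀ pa ∈ partials, k = 0 → pa.2 ≤ 100) →
      pvLevels steps m k partials
        = partials.flatMap (fun pa =>
            ((pvProd steps k).filter (fun c => pa.2 + c.sum ≤ 100)).map
              (fun c => (pa.1 ++ c, pa.2 + c.sum))) := by
  intro k
  induction k with
  | zero =>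
    intro partials h
    show partials = _
    induction partials with
    | nil => rfl
    | cons pa t iht =>
      rw [List.flatMap_cons]
      have hpa : pa.2 ≤ 100 := h pa (by simp) rfl
      rw [← iht (fun q hq hk => h q (by simp [hq]) hk)]
      simp [pvProd, List.filter, hpa]
  | succ k ih =>
    intro partials h
    show pvLevels steps m k _ = _
    rw [ih _ ?hinv]
    case hinv =>
      intro pa hpa hk0
      subst hk0
      simp only [List.mem_flatMap] at hpa
      obtain ⟨q, _, s, _, hpa⟩ := hpa
      by_cases hg : q.2 + s ≤ 100 - ((0 : Nat) : Int) * m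
      · rw [if_pos hg] at hpa
        simp only [List.mem_singleton] at hpa
        subst hpa
        push_cast at hg
        show q.2 + s ≤ 100
        omega
      · rw [if_neg hg] at hpa
        simp at hpa
    rw [List.flatMap_assoc]
    apply pv_flatMap_congr
    intro pa hpa
    rw [List.flatMap_assoc]
    show _ = ((pvProd steps (k+1)).filter _).map _
    rw [show pvProd steps (k+1)
          = steps.flatMap (fun s => (pvProd steps k).map (fun c => s :: c)) from rfl]
    rw [List.filter_flatMap, List.map_flatMap]
    apply pv_flatMap_congr
    intro s hs
    by_cases hg : pa.2 + s ≤ 100 - (k : Int) * m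
    · rw [if_pos hg]
      simp only [List.flatMap_cons, List.flatMap_nil, List.append_nil]
      symm
      rw [List.filter_map, List.map_map]
      rw [List.filter_congr
        (l := pvProd steps k)
        (q := fun c => decide ((pa.2 + s) + c.sum ≤ 100))
        (by intro c hc
            simp only [Function.comp_apply, List.sum_cons, decide_eq_decide]
            omega)]
      apply List.map_congr_left
      intro c hc
      simp only [Function.comp_apply, Prod.mk.injEq, List.sum_cons]
      exact ⟨by simp, by ring⟩
    · rw [if_neg hg]
      simp only [List.flatMap_nil]
      symm
      rw [List.map_eq_nil_iff, List.filter_eq_nil_iff]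
      intro c hc
      simp only [List.mem_map] at hc
      obtain ⟨c', hc', rfl⟩ := hc
      have h1 := pvProd_sum_lb steps m hm k c' hc'
      simp only [List.sum_cons, decide_eq_true_eq]
      push_cast at h1 hg ⊢
      nlinarith

theorem pvAlt_eq_filter (steps : List Int) (m : Int)
    (hmin : PySem.List.min? steps (fun x => x) = some m) (k : Nat) :
    (pvLevels steps m (k+1) [([], 0)]).map (fun pa => pa.1)
      = (pvProd steps (k+1)).filter (fun c => (0 : Int) + c.sum ≤ 100) := by
  have hm : ∀ s ∈ steps, m ≤ s := fun s hs => PySem.List.min?_isMin hmin s hs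
  rw [pvLevels_eq steps m hm (k+1) [([], 0)] (by intro pa hpa hk; simp at hk)]
  simp only [List.flatMap_cons, List.flatMap_nil, List.append_nil, List.map_map]
  rw [show ((fun pa => pa.1) ∘ fun c => (([] : List Int) ++ c, 0 + c.sum)) = fun c => c from
    by funext c; simp]
  simp

theorem main_eq (steps : List Int) (n : Int) (hpre : 0 ≤ n)
    (hnd : ¬ D_feasible_combos_py steps n) :
    feasible_combos_py steps n = feasible_combos_py_alt steps n := by
  rcases eq_or_ne n 0 with rfl | hn0
  · simp [feasible_combos_py, feasible_combos_py_alt]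
  · have hk : ∃ k : Nat, n.toNat = k + 1 := ⟨n.toNat - 1, by omega⟩
    obtain ⟨k, hk⟩ := hk
    have hBif : feasible_combos_py_alt steps n
        = match PySem.List.min? steps (fun x => x) with
          | none => []
          | some m => (pvLevels steps m n.toNat [([], 0)]).map (fun pa => pa.1) := by
      unfold feasible_combos_py_alt
      rw [if_neg (show ¬ n ≤ 0 by omega)]
    cases hsteps : steps with
    | nil =>
      subst hsteps
      rw [hBif]
      have hmin : PySem.List.min? ([] : List Int) (fun x => x) = none := by
        rw [PySem.List.min?_eq_none_iff]
      rw [hmin]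
      rcases eq_or_ne n 1 with rfl | hn1
      · simp [feasible_combos_py]
      · unfold feasible_combos_py
        rw [if_neg hn0, if_neg hn1, hk]
        simp [pvProd]
    | cons x t =>
      rw [← hsteps]
      have hne : steps ≠ [] := by rw [hsteps]; simp
      have hmin : ∃ m, PySem.List.min? steps (fun x => x) = some m := by
        cases h : PySem.List.min? steps (fun x => x) with
        | none => rw [PySem.List.min?_eq_none_iff] at h; exact absurd h hne
        | some m => exact ⟨m, rfl⟩
      obtain ⟨m, hmin⟩ := hmin
      have hm : ∀ s ∈ steps, m ≤ s := fun s hs => PySem.List.min?_isMin hmin s hs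
      rw [hBif, hmin]
      show feasible_combos_py steps n = (pvLevels steps m n.toNat [([], 0)]).map (fun pa => pa.1)
      rw [hk, pvAlt_eq_filter steps m hmin k]
      rcases eq_or_ne n 1 with rfl | hn1
      · -- n = 1: ¬D gives every step ≤ 100, so the filter keeps everything
        have hall : ∀ s ∈ steps, s ≤ 100 := by
          intro s hs
          by_contra h
          exact hnd ⟨rfl, s, hs, by omega⟩
        have hk1 : k = 0 := by omega
        subst hk1
        unfold feasible_combos_py
        rw [if_neg hn0, if_pos rfl, pvProd_one]
        symm
        rw [List.filter_eq_self]
        intro c hc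
        simp only [List.mem_map] at hc
        obtain ⟨s, hs, rfl⟩ := hc
        simp only [List.sum_cons, List.sum_nil, decide_eq_true_eq]
        have := hall s hs
        omega
      · unfold feasible_combos_py
        rw [if_neg hn0, if_neg hn1, hk]
        rw [PySem.List.foldl_append_ite_eq_filter]
        simp only [List.nil_append]
        symm
        apply List.filter_congr
        intro c hc
        simp only [decide_eq_decide]
        omega

-- ===== VERDICT (by name: the statement is the Claim_ definition above) =====

theorem feasible_combos_py_spec : Claim_unchanged_feasible_combos_py := by
  intro steps n _ hpre hnd
  exact main_eq steps n hpre hnd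

theorem feasible_combos_py_changed : Claim_changed_feasible_combos_py := by
  unfold Claim_changed_feasible_combos_py; decide

theorem feasible_combos_py_tight : Claim_exact_feasible_combos_py := by
  intro steps n _ hpre hd
  obtain ⟨hn1, s0, hs0, hs0gt⟩ := hd
  subst hn1
  have hsteps : steps ≠ [] := by intro h; simp [h] at hs0
  have hmin : ∃ m, PySem.List.min? steps (fun x => x) = some m := by
    cases h : PySem.List.min? steps (fun x => x) with
    | none => rw [PySem.List.min?_eq_none_iff] at h; exact absurd h hsteps
    | some m => exact ⟨m, rfl⟩
  obtain ⟨m, hmin⟩ := hmin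
  have hm : ∀ s ∈ steps, m ≤ s := fun s hs => PySem.List.min?_isMin hmin s hs
  have hA : feasible_combos_py steps 1 = steps.map (fun s => [s]) := by
    simp [feasible_combos_py]
  have hB : feasible_combos_py_alt steps 1
      = (pvProd steps 1).filter (fun c => (0:Int) + c.sum ≤ 100) := by
    unfold feasible_combos_py_alt
    rw [if_neg (by omega), hmin]
    exact pvAlt_eq_filter steps m hmin 0
  intro heq
  have hlen : (feasible_combos_py steps 1).length = (feasible_combos_py_alt steps 1).length := by
    rw [heq]
  rw [hA, hB, pvProd_one, List.length_map] at hlen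
  have hlt : ((steps.map (fun s => [s])).filter (fun c => (0:Int) + c.sum ≤ 100)).length < steps.length := by
    rw [List.filter_map, List.length_map]
    apply List.length_filter_lt_length_iff_exists.mpr
    refine ⟨s0, hs0, ?_⟩
    simp only [Function.comp_apply, List.sum_cons, List.sum_nil, add_zero,
      decide_eq_true_eq, not_le]
    omega
  omega
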